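-- pv_equiv track=rewrite | github.com/GuyRoosevelt/Minecraft-Dungeons-The-Awakening | world.py | is_dsl_valid
-- ===== SOURCE A (Python) =====
-- def is_dsl_valid(dsl):
--     lines = dsl.splitlines()
--     lines = [l for l in lines if l]
--     pipe_counts = [line.count("|") for line in lines]
--     for count in pipe_counts:
--         if count != pipe_counts[0]:
--             return False
--
--     return True
-- ===== SOURCE B (Python) =====
-- def is_dsl_valid(dsl):
--     counts = [line.count("|") for line in dsl.splitlines() if line]
--     return sum(counts) == len(counts) * max(counts, default=0)
-- ===== Notes on version B (the rewrite author's own statement) =====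
-- stated objective: alternative
-- what changed: Replaces A's compare-each-count-to-the-first loop with an aggregate arithmetic test: the pipe-counts of non-empty lines are all equal iff their sum equals their number times their maximum (no reference element, no element-wise comparison).
import Mathlib
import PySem

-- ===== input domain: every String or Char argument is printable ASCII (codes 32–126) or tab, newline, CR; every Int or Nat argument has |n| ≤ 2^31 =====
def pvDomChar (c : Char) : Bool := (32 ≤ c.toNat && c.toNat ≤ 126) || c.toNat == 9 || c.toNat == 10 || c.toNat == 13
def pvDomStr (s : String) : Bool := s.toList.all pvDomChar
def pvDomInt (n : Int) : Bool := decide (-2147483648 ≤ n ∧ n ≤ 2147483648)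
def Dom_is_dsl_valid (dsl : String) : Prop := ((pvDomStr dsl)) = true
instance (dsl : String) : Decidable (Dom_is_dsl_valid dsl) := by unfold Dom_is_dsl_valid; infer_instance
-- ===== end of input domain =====

-- B replaces A's compare-each-count-to-the-first loop by an aggregate arithmetic
-- test: the pipe-counts are all equal iff sum = length * max (alternative, same cost).

-- ===== PORT A =====
-- the 'for count in pipe_counts: if count != pipe_counts[0]: return False' loop
def pvLoopA (c0 : Nat) : List Nat → Bool
  | [] => true
  | c :: rest => if c ≠ c0 then false else pvLoopA c0 rest

def is_dsl_valid (dsl : String) : Bool :=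
  let lines := PySem.Str.splitlines dsl
  let lines := lines.filter (fun l => l ≠ "")
  let pipe_counts := lines.map (fun line => PySem.Str.count line "|")
  match pipe_counts with
  | [] => true                      -- loop body never runs, pipe_counts[0] never read
  | c0 :: _ => pvLoopA c0 pipe_counts

-- ===== PORT B =====
def is_dsl_valid_alt (dsl : String) : Bool :=
  let counts := ((PySem.Str.splitlines dsl).filter (fun l => l ≠ "")).map
    (fun line => PySem.Str.count line "|")
  decide (counts.sum = counts.length * ((PySem.List.max? counts (fun x => x)).getD 0))

-- ===== PRECONDITION & SPEC =====
def Spec_is_dsl_valid (dsl : String) (out : Bool) : Prop := out = is_dsl_valid_alt dsl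
instance (dsl : String) (out : Bool) : Decidable (Spec_is_dsl_valid dsl out) := by unfold Spec_is_dsl_valid; infer_instance

-- ===== CLAIM (what is proved, stated in full; the proofs are below) =====
def Claim_equal_is_dsl_valid : Prop := ∀ (dsl : String), Dom_is_dsl_valid dsl → Spec_is_dsl_valid dsl (is_dsl_valid dsl)

-- ===== LEMMAS AND PROOFS =====

theorem pvLoopA_eq_all (c0 : Nat) (l : List Nat) :
    pvLoopA c0 l = l.all (fun c => c == c0) := by
  induction l with
  | nil => rfl
  | cons c rest ih => by_cases h : c = c0 <;> simp [pvLoopA, h, ih]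

-- a list of naturals bounded by M sums to length * M exactly when every element is M
theorem sum_eq_len_mul_iff (l : List Nat) (M : Nat) (hle : ∀ x ∈ l, x ≤ M) :
    (l.sum = l.length * M ↔ ∀ x ∈ l, x = M) := by
  induction l with
  | nil => simp
  | cons a t ih =>
    have ha : a ≤ M := hle a (by simp)
    have ht : ∀ x ∈ t, x ≤ M := fun x hx => hle x (by simp [hx])
    have htsum : t.sum ≤ t.length * M := by
      calc t.sum ≤ t.length • M := List.sum_le_card_nsmul t M ht
        _ = t.length * M := smul_eq_mul ..
    have := ih ht
    constructor
    · intro h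
      have h1 : a = M ∧ t.sum = t.length * M := by
        simp [List.sum_cons, List.length_cons, Nat.succ_mul] at h; omega
      intro x hx
      rcases List.mem_cons.mp hx with rfl | hx
      · exact h1.1
      · exact (this.mp h1.2) x hx
    · intro h
      have h1 : a = M := h a (by simp)
      have h2 : t.sum = t.length * M := this.mpr (fun x hx => h x (by simp [hx]))
      simp [List.sum_cons, List.length_cons, h1, h2, Nat.succ_mul]; omega

theorem key (l : List Nat) :
    (match l with
      | [] => true
      | c0 :: _ => pvLoopA c0 l) =
    decide (l.sum = l.length * ((PySem.List.max? l (fun x => x)).getD 0)) := by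
  cases l with
  | nil => decide
  | cons c0 t =>
    show pvLoopA c0 (c0 :: t) = _
    rw [pvLoopA_eq_all]
    have hmax : PySem.List.max? (c0 :: t) (fun x => x) = some (t.foldl max c0) :=
      PySem.List.max?_id_cons c0 t
    set M := t.foldl max c0 with hM
    have hMmem : M ∈ c0 :: t := PySem.List.max?_mem hmax
    have hle : ∀ x ∈ c0 :: t, x ≤ M := fun x hx => PySem.List.max?_isMax hmax x hx
    rw [hmax]
    simp only [Option.getD_some]
    have hiff := sum_eq_len_mul_iff (c0 :: t) M hle
    rw [Bool.eq_iff_iff]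
    simp only [List.all_eq_true, beq_iff_eq, decide_eq_true_eq]
    rw [hiff]
    constructor
    · intro h x hx
      have hMc0 : M = c0 := h M hMmem
      rw [hMc0]; exact h x hx
    · intro h x hx
      have hc0M : c0 = M := h c0 (by simp)
      rw [← hc0M] at h; exact h x hx

-- ===== VERDICT (by name: the statement is the Claim_ definition above) =====
theorem is_dsl_valid_spec : Claim_equal_is_dsl_valid := by
  intro dsl _
  unfold Spec_is_dsl_valid is_dsl_valid is_dsl_valid_alt
  exact key _
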